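-- pv_equiv track=rewrite | github.com/elonmj/web_app_warriors | Codes/classment.py | calculer_categorie_moyenne
-- ===== SOURCE A (Python) =====
-- def calculer_categorie_moyenne(parcours):
--     categories = {'A': 5, 'B': 4, 'C': 3, 'D': 2, 'E': 1}
--     nb_matchs = len(parcours)
--     points_joueur = sum(categories[cat] for cat in parcours)
--
--     # Calculer les bornes pour chaque catégorie
--     bornes = {}
--     for cat, points in categories.items():
--         bornes[cat] = ((points-1) * nb_matchs, points * nb_matchs)
--
--     # Trouver la catégorie correspondante aux points du joueur
--     for cat, (borne_inf, borne_sup) in sorted(bornes.items(), reverse=True):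
--         if borne_inf < points_joueur <= borne_sup:
--             return cat
-- ===== SOURCE B (Python) =====
-- def calculer_categorie_moyenne(parcours):
--     categories = {'A': 5, 'B': 4, 'C': 3, 'D': 2, 'E': 1}
--     nb_matchs = len(parcours)
--     points_joueur = sum(categories[cat] for cat in parcours)
--     if nb_matchs == 0:
--         return None
--     # ceiling of the average points per match, a value in 1..5
--     p = -(-points_joueur // nb_matchs)
--     return {5: 'A', 4: 'B', 3: 'C', 2: 'D', 1: 'E'}[p]
-- ===== Notes on version B (the rewrite author's own statement) =====
-- stated objective: simpler
-- what changed: Replaces building the bornes dict and scanning its reverse-sorted bands with a direct ceiling division of the point sum and a value-to-letter lookup.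
import Mathlib
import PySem

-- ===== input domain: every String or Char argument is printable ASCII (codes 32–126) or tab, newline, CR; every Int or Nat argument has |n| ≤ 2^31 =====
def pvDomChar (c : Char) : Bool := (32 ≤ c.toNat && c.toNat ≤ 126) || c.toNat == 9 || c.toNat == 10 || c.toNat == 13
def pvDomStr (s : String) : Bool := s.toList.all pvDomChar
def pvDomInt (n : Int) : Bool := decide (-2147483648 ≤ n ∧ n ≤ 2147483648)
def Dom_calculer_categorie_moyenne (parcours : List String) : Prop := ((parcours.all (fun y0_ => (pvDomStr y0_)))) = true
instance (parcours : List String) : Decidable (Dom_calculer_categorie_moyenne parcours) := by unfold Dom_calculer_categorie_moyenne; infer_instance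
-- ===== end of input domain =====

-- B replaces A's bornes-dict construction and reverse-sorted band scan with a ceiling
-- division of the point sum and a value→letter lookup (objective: simpler).

-- ===== PORT A =====
-- both Pythons compute points_joueur with the identical sum-of-lookups expression;
-- a missing key is Python's KeyError, modelled as none (excluded by Pre_)
def pvPoints (categories : PySem.Dict String Int) (parcours : List String) : Option Int :=
  parcours.foldl (fun acc cat => acc.bind (fun a => (categories.get? cat).map (fun p => a + p))) (some 0)

def calculer_categorie_moyenne (parcours : List String) : Option String :=
  let categories : PySem.Dict String Int :=
    PySem.Dict.ofList [("A", 5), ("B", 4), ("C", 3), ("D", 2), ("E", 1)]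
  let nb_matchs : Int := parcours.length
  match pvPoints categories parcours with
  | none => none   -- KeyError on an unknown category (outside Pre_)
  | some points_joueur =>
    let bornes : PySem.Dict String (Int × Int) :=
      categories.items.foldl
        (fun b cp => b.insert cp.1 ((cp.2 - 1) * nb_matchs, cp.2 * nb_matchs)) PySem.Dict.empty
    -- sorted(bornes.items(), reverse=True): keys are distinct, so Python's tuple
    -- comparison never reaches the values — sorting by the key alone is exact here
    ((PySem.List.sorted bornes.items (fun kv => kv.1) true).find?
       (fun kv => decide (kv.2.1 < points_joueur) && decide (points_joueur ≤ kv.2.2))).map (·.1)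

-- ===== PORT B =====
def calculer_categorie_moyenne_alt (parcours : List String) : Option String :=
  let categories : PySem.Dict String Int :=
    PySem.Dict.ofList [("A", 5), ("B", 4), ("C", 3), ("D", 2), ("E", 1)]
  let nb_matchs : Int := parcours.length
  match pvPoints categories parcours with
  | none => none   -- KeyError on an unknown category (outside Pre_)
  | some points_joueur =>
    if nb_matchs = 0 then none
    else
      let p : Int := -(PySem.Int.floordiv (-points_joueur) nb_matchs)
      PySem.Dict.get? (PySem.Dict.ofList [((5:Int), "A"), (4, "B"), (3, "C"), (2, "D"), (1, "E")]) p

-- ===== PRECONDITION & SPEC =====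
-- Pre_ excludes parcours containing a string other than 'A'..'E', on which both Pythons raise KeyError
def Pre_calculer_categorie_moyenne (parcours : List String) : Prop :=
  ∀ c ∈ parcours, c = "A" ∨ c = "B" ∨ c = "C" ∨ c = "D" ∨ c = "E"
instance (parcours : List String) : Decidable (Pre_calculer_categorie_moyenne parcours) := by
  unfold Pre_calculer_categorie_moyenne; infer_instance
def pvWitness_calculer_categorie_moyenne : List String := ["A", "C", "E", "E"]

def Spec_calculer_categorie_moyenne (parcours : List String) (out : Option String) : Prop := out = calculer_categorie_moyenne_alt parcours
instance (parcours : List String) (out : Option String) : Decidable (Spec_calculer_categorie_moyenne parcours out) := by unfold Spec_calculer_categorie_moyenne; infer_instance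

-- ===== CLAIM (what is proved, stated in full; the proofs are below) =====
def Claim_equal_calculer_categorie_moyenne : Prop := ∀ (parcours : List String), Dom_calculer_categorie_moyenne parcours → Pre_calculer_categorie_moyenne parcours → Spec_calculer_categorie_moyenne parcours (calculer_categorie_moyenne parcours)

-- ===== LEMMAS AND PROOFS =====

-- the shared sum evaluates, and each match is worth 1..5 points
lemma pvPoints_spec (parcours : List String)
    (h : Pre_calculer_categorie_moyenne parcours) (a : Int) :
    ∃ s : Int,
      parcours.foldl (fun acc cat => acc.bind (fun x =>
        ((PySem.Dict.ofList [("A", (5:Int)), ("B", 4), ("C", 3), ("D", 2), ("E", 1)]).get? cat).map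
          (fun p => x + p))) (some a) = some (a + s) ∧
      (parcours.length : Int) ≤ s ∧ s ≤ 5 * parcours.length := by
  induction parcours generalizing a with
  | nil => exact ⟨0, by simp⟩
  | cons c t ih =>
    have ht : Pre_calculer_categorie_moyenne t := fun x hx => h x (by simp [hx])
    rcases h c (by simp) with h1 | h1 | h1 | h1 | h1 <;> subst h1
    · obtain ⟨s, hs, hlo, hhi⟩ := ih ht (a + 5)
      have hv : (PySem.Dict.ofList [("A", (5:Int)), ("B", 4), ("C", 3), ("D", 2), ("E", 1)]).get? "A" = some 5 := by rfl
      refine ⟨5 + s, ?_, ?_, ?_⟩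
      · simp only [List.foldl_cons, hv, Option.bind_some, Option.map_some]
        rw [hs, add_assoc]
      · simp only [List.length_cons]; push_cast; omega
      · simp only [List.length_cons]; push_cast; omega
    · obtain ⟨s, hs, hlo, hhi⟩ := ih ht (a + 4)
      have hv : (PySem.Dict.ofList [("A", (5:Int)), ("B", 4), ("C", 3), ("D", 2), ("E", 1)]).get? "B" = some 4 := by rfl
      refine ⟨4 + s, ?_, ?_, ?_⟩
      · simp only [List.foldl_cons, hv, Option.bind_some, Option.map_some]
        rw [hs, add_assoc]
      · simp only [List.length_cons]; push_cast; omega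
      · simp only [List.length_cons]; push_cast; omega
    · obtain ⟨s, hs, hlo, hhi⟩ := ih ht (a + 3)
      have hv : (PySem.Dict.ofList [("A", (5:Int)), ("B", 4), ("C", 3), ("D", 2), ("E", 1)]).get? "C" = some 3 := by rfl
      refine ⟨3 + s, ?_, ?_, ?_⟩
      · simp only [List.foldl_cons, hv, Option.bind_some, Option.map_some]
        rw [hs, add_assoc]
      · simp only [List.length_cons]; push_cast; omega
      · simp only [List.length_cons]; push_cast; omega
    · obtain ⟨s, hs, hlo, hhi⟩ := ih ht (a + 2)
      have hv : (PySem.Dict.ofList [("A", (5:Int)), ("B", 4), ("C", 3), ("D", 2), ("E", 1)]).get? "D" = some 2 := by rfl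
      refine ⟨2 + s, ?_, ?_, ?_⟩
      · simp only [List.foldl_cons, hv, Option.bind_some, Option.map_some]
        rw [hs, add_assoc]
      · simp only [List.length_cons]; push_cast; omega
      · simp only [List.length_cons]; push_cast; omega
    · obtain ⟨s, hs, hlo, hhi⟩ := ih ht (a + 1)
      have hv : (PySem.Dict.ofList [("A", (5:Int)), ("B", 4), ("C", 3), ("D", 2), ("E", 1)]).get? "E" = some 1 := by rfl
      refine ⟨1 + s, ?_, ?_, ?_⟩
      · simp only [List.foldl_cons, hv, Option.bind_some, Option.map_some]
        rw [hs, add_assoc]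
      · simp only [List.length_cons]; push_cast; omega
      · simp only [List.length_cons]; push_cast; omega

-- ===== VERDICT (by name: the statement is the Claim_ definition above) =====
-- names the result of sorted(bornes.items(), reverse=True)
lemma pvSorted_bornes (n : Int) :
    PySem.List.sorted
      [("A",((5-1)*n,5*n)),("B",((4-1)*n,4*n)),("C",((3-1)*n,3*n)),("D",((2-1)*n,2*n)),("E",((1-1)*n,1*n))]
      (fun kv => kv.1) true
    = [("E",((1-1)*n,1*n)),("D",((2-1)*n,2*n)),("C",((3-1)*n,3*n)),("B",((4-1)*n,4*n)),("A",((5-1)*n,5*n))] := by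
  apply PySem.List.sorted_rev_eq_of_perm_of_pairwise_gt
  · simpa using List.reverse_perm
      [("A",((5-1)*n,5*n)),("B",((4-1)*n,4*n)),("C",((3-1)*n,3*n)),("D",((2-1)*n,2*n)),("E",((1-1)*n,1*n))]
  · simp only [List.pairwise_cons, List.mem_cons]
    norm_num
    decide

-- ===== VERDICT =====
theorem calculer_categorie_moyenne_spec : Claim_equal_calculer_categorie_moyenne := by
  intro parcours _ hpre
  unfold Spec_calculer_categorie_moyenne
  obtain ⟨s, hs, hlo, hhi⟩ := pvPoints_spec parcours hpre 0
  rw [zero_add] at hs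
  simp only [calculer_categorie_moyenne, calculer_categorie_moyenne_alt, pvPoints]
  rw [hs]
  simp only []
  have hn0 : (0:Int) ≤ (parcours.length : Int) := Int.natCast_nonneg _
  generalize hgn : (parcours.length : Int) = n at hlo hhi hn0 ⊢
  have hitems :
      (List.foldl (fun b cp => b.insert cp.1 ((cp.2 - 1) * n, cp.2 * n))
        PySem.Dict.empty
        (PySem.Dict.ofList [("A", (5:Int)), ("B", 4), ("C", 3), ("D", 2), ("E", 1)]).items).items
      = [("A",((5-1)*n,5*n)),("B",((4-1)*n,4*n)),("C",((3-1)*n,3*n)),("D",((2-1)*n,2*n)),("E",((1-1)*n,1*n))] := by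
    rfl
  rw [hitems, pvSorted_bornes]
  by_cases hn : n = 0
  · rw [List.find?_cons_of_neg (by simp only [Bool.and_eq_true, decide_eq_true_eq, not_and, not_le]; omega)]
    rw [List.find?_cons_of_neg (by simp only [Bool.and_eq_true, decide_eq_true_eq, not_and, not_le]; omega)]
    rw [List.find?_cons_of_neg (by simp only [Bool.and_eq_true, decide_eq_true_eq, not_and, not_le]; omega)]
    rw [List.find?_cons_of_neg (by simp only [Bool.and_eq_true, decide_eq_true_eq, not_and, not_le]; omega)]
    rw [List.find?_cons_of_neg (by simp only [Bool.and_eq_true, decide_eq_true_eq, not_and, not_le]; omega)]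
    simp [hn]
  · have hpos : (0:Int) < n := lt_of_le_of_ne hn0 (Ne.symm hn)
    rw [if_neg hn]
    by_cases h1 : s ≤ 1 * n
    · rw [List.find?_cons_of_pos (by simp only [Bool.and_eq_true, decide_eq_true_eq]; omega)]
      have hp : -(PySem.Int.floordiv (-s) n) = 1 :=
        (PySem.Int.neg_floordiv_neg_eq_iff_of_pos hpos).mpr ⟨by omega, by omega⟩
      rw [hp]; rfl
    · by_cases h2 : s ≤ 2 * n
      · rw [List.find?_cons_of_neg (by simp only [Bool.and_eq_true, decide_eq_true_eq, not_and, not_le]; omega)]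
        rw [List.find?_cons_of_pos (by simp only [Bool.and_eq_true, decide_eq_true_eq]; omega)]
        have hp : -(PySem.Int.floordiv (-s) n) = 2 :=
          (PySem.Int.neg_floordiv_neg_eq_iff_of_pos hpos).mpr ⟨by omega, by omega⟩
        rw [hp]; rfl
      · by_cases h3 : s ≤ 3 * n
        · rw [List.find?_cons_of_neg (by simp only [Bool.and_eq_true, decide_eq_true_eq, not_and, not_le]; omega)]
          rw [List.find?_cons_of_neg (by simp only [Bool.and_eq_true, decide_eq_true_eq, not_and, not_le]; omega)]
          rw [List.find?_cons_of_pos (by simp only [Bool.and_eq_true, decide_eq_true_eq]; omega)]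
          have hp : -(PySem.Int.floordiv (-s) n) = 3 :=
            (PySem.Int.neg_floordiv_neg_eq_iff_of_pos hpos).mpr ⟨by omega, by omega⟩
          rw [hp]; rfl
        · by_cases h4 : s ≤ 4 * n
          · rw [List.find?_cons_of_neg (by simp only [Bool.and_eq_true, decide_eq_true_eq, not_and, not_le]; omega)]
            rw [List.find?_cons_of_neg (by simp only [Bool.and_eq_true, decide_eq_true_eq, not_and, not_le]; omega)]
            rw [List.find?_cons_of_neg (by simp only [Bool.and_eq_true, decide_eq_true_eq, not_and, not_le]; omega)]
            rw [List.find?_cons_of_pos (by simp only [Bool.and_eq_true, decide_eq_true_eq]; omega)]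
            have hp : -(PySem.Int.floordiv (-s) n) = 4 :=
              (PySem.Int.neg_floordiv_neg_eq_iff_of_pos hpos).mpr ⟨by omega, by omega⟩
            rw [hp]; rfl
          · rw [List.find?_cons_of_neg (by simp only [Bool.and_eq_true, decide_eq_true_eq, not_and, not_le]; omega)]
            rw [List.find?_cons_of_neg (by simp only [Bool.and_eq_true, decide_eq_true_eq, not_and, not_le]; omega)]
            rw [List.find?_cons_of_neg (by simp only [Bool.and_eq_true, decide_eq_true_eq, not_and, not_le]; omega)]
            rw [List.find?_cons_of_neg (by simp only [Bool.and_eq_true, decide_eq_true_eq, not_and, not_le]; omega)]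
            rw [List.find?_cons_of_pos (by simp only [Bool.and_eq_true, decide_eq_true_eq]; omega)]
            have hp : -(PySem.Int.floordiv (-s) n) = 5 :=
              (PySem.Int.neg_floordiv_neg_eq_iff_of_pos hpos).mpr ⟨by omega, by omega⟩
            rw [hp]; rfl
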